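-- pv_equiv track=rewrite | github.com/Sefaria/Sefaria-Project | sefaria/model/linker/context_mutation.py | _find_ordered_subset_indices
-- ===== SOURCE A (Python) =====
-- from typing import List, Sequence, Dict, Optional, Tuple, Iterable, Callable, Set, TYPE_CHECKING
--
-- def _find_ordered_subset_indices(sequence: Sequence[str], targets: Sequence[str],
--                                  disallowed_indices: Set[int]) -> Optional[List[int]]:
--     """
--     Given `sequence` and target slugs, return the earliest set of indices in sequence
--     for each term in `targets` such that occurrences are ordered and not in `disallowed_indices`.
--     """
--     indices: List[int] = []
--     last_index = -1
--     for target in targets: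
--         try:
--             next_index = sequence.index(target, last_index + 1)
--         except ValueError:
--             return None
--         while next_index in disallowed_indices:
--             try:
--                 next_index = sequence.index(target, next_index + 1)
--             except ValueError:
--                 return None
--         indices.append(next_index)
--         last_index = next_index
--     return indices
-- ===== SOURCE B (Python) =====
-- from typing import List, Sequence, Optional, Set
--
-- def _bisect_right(occ: List[int], x: int) -> int:
--     """Hand-written bisect_right: first position in sorted `occ` whose value exceeds x."""
--     lo, hi = 0, len(occ)
--     while lo < hi:
--         mid = (lo + hi) // 2
--         if occ[mid] <= x:
--             lo = mid + 1
--         else: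
--             hi = mid
--     return lo
--
-- def _find_ordered_subset_indices(sequence: Sequence[str], targets: Sequence[str],
--                                  disallowed_indices: Set[int]) -> Optional[List[int]]:
--     """Build an inverted index slug -> occurrence positions, then binary-search it per target."""
--     positions = {}
--     for i, slug in enumerate(sequence):
--         positions.setdefault(slug, []).append(i)
--     indices: List[int] = []
--     last = -1
--     for target in targets:
--         occ = positions.get(target, [])
--         j = _bisect_right(occ, last)
--         while j < len(occ) and occ[j] in disallowed_indices:
--             j += 1
--         if j == len(occ):
--             return None
--         indices.append(occ[j])
--         last = occ[j]
--     return indices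
-- ===== Notes on version B (the rewrite author's own statement) =====
-- stated objective: alternative
-- what changed: Replaces A's repeated sequence.index forward scans per target by a two-stage algorithm: one pass builds an inverted index (dict slug -> sorted occurrence positions), then each target binary-searches its own position list for the first occurrence past the previous match, skipping disallowed positions within that list.
import Mathlib
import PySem

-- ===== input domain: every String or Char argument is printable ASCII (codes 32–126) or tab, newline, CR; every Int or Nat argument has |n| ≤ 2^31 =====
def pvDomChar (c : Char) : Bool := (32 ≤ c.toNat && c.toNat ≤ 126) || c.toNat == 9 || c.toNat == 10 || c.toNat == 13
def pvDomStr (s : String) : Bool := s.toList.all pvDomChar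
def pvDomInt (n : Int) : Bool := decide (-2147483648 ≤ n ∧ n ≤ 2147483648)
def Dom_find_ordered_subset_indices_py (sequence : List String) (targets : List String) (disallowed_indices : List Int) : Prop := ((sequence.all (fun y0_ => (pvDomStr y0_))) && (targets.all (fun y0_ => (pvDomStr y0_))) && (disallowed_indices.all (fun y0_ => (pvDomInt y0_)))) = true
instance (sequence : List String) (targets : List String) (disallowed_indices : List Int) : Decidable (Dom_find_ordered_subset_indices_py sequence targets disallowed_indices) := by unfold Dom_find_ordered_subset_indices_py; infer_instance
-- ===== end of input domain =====

-- B replaces A's repeated `sequence.index` forward scans per target by a two-stage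
-- algorithm: one pass builds an inverted index (slug -> sorted occurrence positions),
-- then each target binary-searches its own position list; objective: alternative.

-- ===== PORT A =====

-- exact: Python `sequence.index(target, start)` for 0 ≤ start; none = ValueError
def aIndexFrom (sequence : List String) (target : String) (start : Nat) : Option Nat :=
  ((sequence.drop start).findIdx? (· == target)).map (· + start)

theorem aIndexFrom_bounds {sequence : List String} {target : String} {start i : Nat}
    (h : aIndexFrom sequence target start = some i) : start ≤ i ∧ i < sequence.length := by
  unfold aIndexFrom at h
  cases hf : (sequence.drop start).findIdx? (· == target) with
  | none => simp [hf] at h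
  | some j =>
    simp [hf] at h
    have hlt := List.findIdx?_eq_some_iff_findIdx_eq.mp hf
    have : j < sequence.length - start := by
      have := hlt.1; simpa [List.length_drop] using this
    omega

-- exact: the first `sequence.index(target, last+1)` followed by A's
-- `while next_index in disallowed_indices: next_index = sequence.index(target, next_index+1)`
def aRetry (sequence : List String) (target : String) (dis : List Int) (start : Nat) : Option Nat :=
  match h : aIndexFrom sequence target start with
  | none => none
  | some i =>
    if dis.contains (i : Int) then aRetry sequence target dis (i + 1) else some i
termination_by sequence.length - start
decreasing_by
  have := aIndexFrom_bounds h
  omega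

-- the `for target in targets` loop: `indices` kept reversed, appended on return
def aGo (sequence : List String) (dis : List Int) : List String → List Int → Int → Option (List Int)
  | [], indices, _ => some indices.reverse
  | t :: ts, indices, last =>
    match aRetry sequence t dis (last + 1).toNat with
    | none => none
    | some i => aGo sequence dis ts ((i : Int) :: indices) (i : Int)

def find_ordered_subset_indices_py (sequence : List String) (targets : List String) (disallowed_indices : List Int) : Option (List Int) :=
  aGo sequence disallowed_indices targets [] (-1)

-- ===== PORT B =====

-- Source B's hand-written `_bisect_right` lo/hi loop (occ.getD mid 0 is occ[mid]: every
-- entry call has hi = occ.length, so mid stays in range exactly as in the Python)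
def bBisect (occ : List Int) (x : Int) (lo hi : Nat) : Nat :=
  if _h : lo < hi then
    let mid := (lo + hi) / 2
    if occ.getD mid 0 ≤ x then bBisect occ x (mid + 1) hi else bBisect occ x lo mid
  else lo
termination_by hi - lo

-- the `while j < len(occ) and occ[j] in disallowed_indices: j += 1` loop
def bSkip (occ : List Int) (dis : List Int) (j : Nat) : Nat :=
  if h : j < occ.length then
    if dis.contains occ[j] then bSkip occ dis (j + 1) else j
  else j
termination_by occ.length - j

-- the `for target in targets` loop of Source B
def bLoop (positions : PySem.Dict String (List Int)) (dis : List Int) :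
    List String → List Int → Int → Option (List Int)
  | [], indices, _ => some indices.reverse
  | t :: ts, indices, last =>
    let occ := positions.getD t []
    let j := bSkip occ dis (bBisect occ last 0 occ.length)
    if h : j < occ.length then bLoop positions dis ts (occ[j] :: indices) occ[j]
    else none

def find_ordered_subset_indices_py_alt (sequence : List String) (targets : List String) (disallowed_indices : List Int) : Option (List Int) :=
  -- `for i, slug in enumerate(sequence): positions.setdefault(slug, []).append(i)`
  let positions := (PySem.List.enumerate sequence).foldl
    (fun d p => d.modify p.2 [] (fun l => l ++ [p.1])) PySem.Dict.empty
  bLoop positions disallowed_indices targets [] (-1)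

-- ===== PRECONDITION & SPEC =====
def Spec_find_ordered_subset_indices_py (sequence : List String) (targets : List String) (disallowed_indices : List Int) (out : Option (List Int)) : Prop := out = find_ordered_subset_indices_py_alt sequence targets disallowed_indices
instance (sequence : List String) (targets : List String) (disallowed_indices : List Int) (out : Option (List Int)) : Decidable (Spec_find_ordered_subset_indices_py sequence targets disallowed_indices out) := by unfold Spec_find_ordered_subset_indices_py; infer_instance

-- ===== CLAIM (what is proved, stated in full; the proofs are below) =====
def Claim_equal_find_ordered_subset_indices_py : Prop := ∀ (sequence : List String) (targets : List String) (disallowed_indices : List Int), Dom_find_ordered_subset_indices_py sequence targets disallowed_indices → Spec_find_ordered_subset_indices_py sequence targets disallowed_indices (find_ordered_subset_indices_py sequence targets disallowed_indices)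

-- ===== LEMMAS AND PROOFS =====

-- proof-side characterisation of A's per-target step: first index ≥ i (scanning
-- l = sequence.drop i) whose element equals t and which is not disallowed
def firstValid (dis : List Int) (t : String) : List String → Nat → Option Nat
  | [], _ => none
  | s :: rest, i =>
    if s == t && !(dis.contains (i : Int)) then some i else firstValid dis t rest (i + 1)

theorem firstValid_none {dis : List Int} {t : String} :
    ∀ {l : List String} (i : Nat), l.findIdx? (· == t) = none → firstValid dis t l i = none := by
  intro l
  induction l with
  | nil => intro i _; rfl
  | cons s rest ih =>
    intro i h
    rw [List.findIdx?_cons] at h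
    by_cases hs : (s == t) = true
    · simp [hs] at h
    · simp [hs] at h ⊢
      simp [firstValid, hs]
      exact ih (i + 1) (by simpa using h)

theorem firstValid_found {dis : List Int} {t : String} :
    ∀ {l : List String} {j : Nat} (i : Nat), l.findIdx? (· == t) = some j →
      firstValid dis t l i =
        (if dis.contains ((i + j : Nat) : Int) then firstValid dis t (l.drop (j + 1)) (i + j + 1)
         else some (i + j)) := by
  intro l
  induction l with
  | nil => intro j i h; rw [List.findIdx?_nil] at h; exact absurd h (by simp)
  | cons s rest ih =>
    intro j i h
    rw [List.findIdx?_cons] at h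
    by_cases hs : (s == t) = true
    · simp [hs] at h
      subst h
      rw [firstValid]
      simp only [Nat.add_zero, Nat.zero_add, List.drop_succ_cons, List.drop_zero, hs, Bool.true_and]
      by_cases hd : ((i : Int)) ∈ dis
      · simp [hd]
      · simp [hd]
    · simp [hs] at h
      obtain ⟨j', hj', rfl⟩ := h
      have hrec := ih (i + 1) hj'
      have e1 : i + 1 + j' = i + (j' + 1) := by omega
      rw [e1] at hrec
      have hc' : ¬(s == t && !(dis.contains (i : Int))) = true := by simp [hs]
      rw [firstValid, if_neg hc', hrec, List.drop_succ_cons]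

theorem aRetry_eq_firstValid (sequence : List String) (target : String) (dis : List Int) :
    ∀ start : Nat, aRetry sequence target dis start = firstValid dis target (sequence.drop start) start := by
  intro start
  fun_induction aRetry sequence target dis start with
  | case1 start h =>
    unfold aIndexFrom at h
    cases hf : (sequence.drop start).findIdx? (· == target) with
    | none => exact (firstValid_none start hf).symm
    | some j => simp [hf] at h
  | case2 start i h hd ih =>
    unfold aIndexFrom at h
    cases hf : (sequence.drop start).findIdx? (· == target) with
    | none => simp [hf] at h
    | some j =>
      simp [hf] at h
      rw [firstValid_found start hf, List.drop_drop]
      have e : start + j = i := by omega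
      have e2 : start + (j + 1) = i + 1 := by omega
      rw [e, e2, if_pos hd, ih]
  | case3 start i h hd =>
    unfold aIndexFrom at h
    cases hf : (sequence.drop start).findIdx? (· == target) with
    | none => simp [hf] at h
    | some j =>
      simp [hf] at h
      rw [firstValid_found start hf]
      have e : start + j = i := by omega
      rw [e, if_neg hd]

-- proof-side inverted index: the occurrence positions of t in l, counting from i
def occFrom (t : String) : List String → Nat → List Nat
  | [], _ => []
  | s :: rest, i =>
    if s == t then i :: occFrom t rest (i + 1) else occFrom t rest (i + 1)

theorem occFrom_mem_bounds {t : String} :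
    ∀ {l : List String} {i x : Nat}, x ∈ occFrom t l i → i ≤ x ∧ x < i + l.length := by
  intro l
  induction l with
  | nil => intro i x h; simp [occFrom] at h
  | cons s rest ih =>
    intro i x h
    rw [occFrom] at h
    by_cases hs : (s == t) = true
    · rw [if_pos hs] at h
      rcases List.mem_cons.mp h with rfl | h
      · simp
      · have := ih h; simp only [List.length_cons]; omega
    · rw [if_neg hs] at h
      have := ih h; simp only [List.length_cons]; omega

theorem occFrom_append (t : String) :
    ∀ (a b : List String) (i : Nat),
      occFrom t (a ++ b) i = occFrom t a i ++ occFrom t b (i + a.length) := by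
  intro a
  induction a with
  | nil => intro b i; simp [occFrom]
  | cons s rest ih =>
    intro b i
    have e : i + 1 + rest.length = i + (rest.length + 1) := by omega
    simp only [List.cons_append, occFrom, ih, List.length_cons, e]
    by_cases hs : (s == t) = true
    · simp [hs]
    · simp [hs]

-- first element of a position list that is not disallowed
def firstNotNat (dis : List Int) : List Nat → Option Nat
  | [] => none
  | k :: ks => if dis.contains (Int.ofNat k) then firstNotNat dis ks else some k

theorem firstValid_eq_firstNot (dis : List Int) (t : String) :
    ∀ (l : List String) (i : Nat), firstValid dis t l i = firstNotNat dis (occFrom t l i) := by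
  intro l
  induction l with
  | nil => intro i; rfl
  | cons s rest ih =>
    intro i
    rw [firstValid, occFrom]
    by_cases hs : (s == t) = true
    · simp only [hs, Bool.true_and]
      by_cases hd : (((i : Nat) : Int) ∈ dis)
      · simp [firstNotNat, hd, ih]
      · simp [firstNotNat, hd]
    · simp [hs, ih]

-- how many leading elements of a position list are disallowed
def skipCount (dis : List Int) : List Int → Nat
  | [] => 0
  | x :: xs => if dis.contains x then skipCount dis xs + 1 else 0

theorem bSkip_eq (occ dis : List Int) :
    ∀ j : Nat, bSkip occ dis j = j + skipCount dis (occ.drop j) := by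
  intro j
  fun_induction bSkip occ dis j with
  | case1 j h hd ih =>
    rw [List.drop_eq_getElem_cons h, skipCount, if_pos hd, ih]
    omega
  | case2 j h hd =>
    rw [List.drop_eq_getElem_cons h, skipCount, if_neg hd]
    omega
  | case3 j h =>
    rw [List.drop_eq_nil_of_le (by omega), skipCount]
    omega

theorem skipCount_le (dis : List Int) :
    ∀ xs : List Int, skipCount dis xs ≤ xs.length := by
  intro xs
  induction xs with
  | nil => simp [skipCount]
  | cons x xs ih =>
    rw [skipCount]
    by_cases hd : dis.contains x = true
    · rw [if_pos hd]; simp only [List.length_cons]; omega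
    · rw [if_neg hd]; omega

theorem firstNot_skipCount (dis : List Int) :
    ∀ ks : List Nat, firstNotNat dis ks = ks[skipCount dis (ks.map Int.ofNat)]? := by
  intro ks
  induction ks with
  | nil => rfl
  | cons k ks ih =>
    rw [firstNotNat, List.map_cons, skipCount]
    by_cases hd : dis.contains (Int.ofNat k) = true
    · rw [if_pos hd, if_pos hd, ih, List.getElem?_cons_succ]
    · rw [if_neg hd, if_neg hd, List.getElem?_cons_zero]

-- binary search on a list split as (all ≤ x) ++ (all > x) lands exactly at the split
theorem bBisect_split (A B : List Int) (x : Int)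
    (hA : ∀ a ∈ A, a ≤ x) (hB : ∀ b ∈ B, x < b) :
    ∀ lo hi, lo ≤ A.length → A.length ≤ hi → hi ≤ (A ++ B).length →
      bBisect (A ++ B) x lo hi = A.length := by
  intro lo hi
  fun_induction bBisect (A ++ B) x lo hi with
  | case1 lo hi h mid hle ih =>
    intro h1 h2 h3
    apply ih
    · -- mid + 1 ≤ A.length: else (A++B)[mid] would lie in B and exceed x
      by_contra hc
      have hmidA : A.length ≤ mid := by omega
      have hmlt : mid < (A ++ B).length := by omega
      have hmem : (A ++ B)[mid] ∈ B := by
        rw [List.getElem_append_right hmidA]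
        exact List.getElem_mem _
      have hx := hB _ hmem
      rw [List.getD_eq_getElem _ _ hmlt] at hle
      omega
    · omega
    · omega
  | case2 lo hi h mid hgt ih =>
    intro h1 h2 h3
    apply ih
    · omega
    · -- A.length ≤ mid: else (A++B)[mid] would lie in A and be ≤ x
      by_contra hc
      have hmidA : mid < A.length := by omega
      have hmlt : mid < (A ++ B).length := by
        simp only [List.length_append]; omega
      have hmem : (A ++ B)[mid] ∈ A := by
        rw [List.getElem_append_left hmidA]
        exact List.getElem_mem _
      have hx := hA _ hmem
      rw [List.getD_eq_getElem _ _ hmlt] at hgt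
      omega
    · omega
  | case3 lo hi h =>
    intro h1 h2 h3
    omega

-- ((enumerate l i).filter (·.2 == t)).map (·.1) is the inverted index occFrom
theorem enum_filter_eq_occFrom (t : String) :
    ∀ (l : List String) (i : Nat),
      ((PySem.List.enumerate l ((i : Nat) : Int)).filter (fun p => p.2 == t)).map (fun p => p.1)
        = (occFrom t l i).map Int.ofNat := by
  intro l
  induction l with
  | nil => intro i; simp [PySem.List.enumerate_nil, occFrom]
  | cons s rest ih =>
    intro i
    rw [PySem.List.enumerate_cons, occFrom]
    have e : (((i : Nat) : Int) + 1) = (((i + 1 : Nat)) : Int) := by push_cast; ring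
    by_cases hs : (s == t) = true
    · simp only [List.filter_cons, hs, if_pos, List.map_cons]
      rw [e, ih]
      rfl
    · simp only [List.filter_cons, hs, Bool.false_eq_true, if_false]
      rw [e, ih]

-- the dict built by B's first pass looks up to exactly occFrom
theorem positions_getD (sequence : List String) (t : String) :
    ((PySem.List.enumerate sequence).foldl
      (fun d p => d.modify p.2 [] (fun l => l ++ [p.1])) PySem.Dict.empty).getD t []
      = (occFrom t sequence 0).map Int.ofNat := by
  have hfold :
      (PySem.List.enumerate sequence).foldl
        (fun d p => d.modify p.2 [] (fun l => l ++ [p.1])) PySem.Dict.empty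
      = ((PySem.List.enumerate sequence).map (fun p => (p.2, p.1))).foldl
          (fun d p => d.modify p.1 [] (fun l => l ++ [p.2])) PySem.Dict.empty := by
    rw [List.foldl_map]
  rw [hfold, PySem.Dict.getD_foldl_modify_append, PySem.Dict.getD_empty, List.nil_append]
  rw [List.filter_map, List.map_map]
  show ((PySem.List.enumerate sequence (((0 : Nat)) : Int)).filter (fun p => p.2 == t)).map
    (fun p => p.1) = _
  exact enum_filter_eq_occFrom t sequence 0

-- occFrom's start index on a dropped suffix can be normalised
theorem occFrom_drop_start (t : String) (l : List String) (s : Nat) :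
    occFrom t (l.drop s) (min s l.length) = occFrom t (l.drop s) s := by
  by_cases hs : s ≤ l.length
  · rw [Nat.min_eq_left hs]
  · rw [List.drop_eq_nil_of_le (by omega)]
    rfl

-- the two per-target loops agree
theorem aGo_eq_bLoop (sequence : List String) (dis : List Int)
    (pos : PySem.Dict String (List Int))
    (hpos : ∀ t, pos.getD t [] = (occFrom t sequence 0).map Int.ofNat) :
    ∀ (ts : List String) (acc : List Int) (last : Int), -1 ≤ last →
      aGo sequence dis ts acc last = bLoop pos dis ts acc last := by
  intro ts
  induction ts with
  | nil => intro acc last _; rfl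
  | cons t ts ih =>
    intro acc last hlast
    set s : Nat := (last + 1).toNat with hs
    have hsi : ((s : Nat) : Int) = last + 1 := by omega
    set A' : List Int := (occFrom t (sequence.take s) 0).map Int.ofNat with hA'
    set ks : List Nat := occFrom t (sequence.drop s) s with hks
    have hocc : pos.getD t [] = A' ++ ks.map Int.ofNat := by
      rw [hpos t]
      conv_lhs => rw [← List.take_append_drop s sequence]
      rw [occFrom_append, Nat.zero_add, List.length_take, occFrom_drop_start, List.map_append]
    have hAle : ∀ a ∈ A', a ≤ last := by
      intro a ha
      rw [hA'] at ha
      obtain ⟨x, hx, rfl⟩ := List.mem_map.mp ha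
      have hb := occFrom_mem_bounds hx
      have hlen := List.length_take_le s sequence
      have hxi : Int.ofNat x = (x : Int) := rfl
      rw [hxi]
      omega
    have hBgt : ∀ b ∈ ks.map Int.ofNat, last < b := by
      intro b hb
      obtain ⟨x, hx, rfl⟩ := List.mem_map.mp hb
      have hb := occFrom_mem_bounds hx
      have hxi : Int.ofNat x = (x : Int) := rfl
      rw [hxi]
      omega
    rw [bLoop]
    rw [hocc]
    have hbis : bBisect (A' ++ ks.map Int.ofNat) last 0
        (A' ++ ks.map Int.ofNat).length = A'.length :=
      bBisect_split A' (ks.map Int.ofNat) last hAle hBgt 0 _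
        (by omega) (by simp) (le_refl _)
    rw [hbis, bSkip_eq, List.drop_left]
    rw [aGo, ← hs, aRetry_eq_firstValid, firstValid_eq_firstNot, ← hks]
    rw [firstNot_skipCount dis ks]
    set c : Nat := skipCount dis (ks.map Int.ofNat) with hc
    have hcle : c ≤ ks.length := by
      have := skipCount_le dis (ks.map Int.ofNat)
      simpa using this
    by_cases h1 : c < ks.length
    · rw [List.getElem?_eq_getElem h1]
      have hjlt : A'.length + c < (A' ++ ks.map Int.ofNat).length := by
        simp only [List.length_append, List.length_map]; omega
      rw [dif_pos hjlt]
      have hget : (A' ++ ks.map Int.ofNat)[A'.length + c]'hjlt = Int.ofNat ks[c] := by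
        rw [List.getElem_append_right (by omega)]
        simp
      simp only [hget]
      exact ih _ _ (by omega)
    · rw [List.getElem?_eq_none (by omega)]
      rw [dif_neg (by simp only [List.length_append, List.length_map]; omega)]

-- ===== VERDICT (by name: the statement is the Claim_ definition above) =====
theorem find_ordered_subset_indices_py_spec : Claim_equal_find_ordered_subset_indices_py := by
  intro sequence targets dis _
  show find_ordered_subset_indices_py sequence targets dis = find_ordered_subset_indices_py_alt sequence targets dis
  unfold find_ordered_subset_indices_py find_ordered_subset_indices_py_alt
  exact aGo_eq_bLoop sequence dis _ (fun t => positions_getD sequence t) targets [] (-1) (by omega)
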